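-- pv_equiv track=rewrite | github.com/Leggerla/video_alpr_unconstrained | run.py | correct_for_i
-- ===== SOURCE A (Python) =====
-- def correct_for_i(number):
--   number_list = list(number)
--   for i, num in enumerate(number_list):
--     if num == 'I' or num == '1':
--       if i < 2 or i >= 4:
--         number_list[i] = 'I'
--       else:
--         number_list[i] = '1'
--
--   number = ''.join(number_list)
--   return number
-- ===== SOURCE B (Python) =====
-- def correct_for_i(number):
--   return (number[:2].replace('1', 'I')
--           + number[2:4].replace('I', '1')
--           + number[4:].replace('1', 'I'))
-- ===== Notes on version B (the rewrite author's own statement) =====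
-- stated objective: simpler
-- what changed: Replaces the indexed loop that mutates a char list position by position with three positional slices, each fixed by one str.replace, concatenated.
import Mathlib
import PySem

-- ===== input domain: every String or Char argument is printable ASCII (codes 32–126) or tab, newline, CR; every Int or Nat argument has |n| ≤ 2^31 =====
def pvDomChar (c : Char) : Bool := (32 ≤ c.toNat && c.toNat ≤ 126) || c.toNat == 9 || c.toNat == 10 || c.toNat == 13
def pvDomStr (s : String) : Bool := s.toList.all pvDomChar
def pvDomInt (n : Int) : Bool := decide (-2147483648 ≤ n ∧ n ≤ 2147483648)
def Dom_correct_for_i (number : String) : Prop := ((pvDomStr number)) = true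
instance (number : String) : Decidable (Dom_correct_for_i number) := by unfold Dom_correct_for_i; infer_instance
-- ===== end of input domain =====

-- B rewrites A's indexed mutate-in-place loop as three positional slices each fixed by one replace; objective: simpler.

-- ===== PORT A =====
-- literal port: enumerate the char list and set position i to 'I' or '1' depending on i
def correct_for_i (number : String) : String :=
  let number_list := number.toList
  let number_list :=
    (PySem.List.enumerate number_list).foldl
      (fun nl p =>
        if p.2 = 'I' ∨ p.2 = '1' then
          if p.1 < 2 ∨ 4 ≤ p.1 then PySem.List.pySetD nl p.1 'I'
          else PySem.List.pySetD nl p.1 '1'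
        else nl)
      number_list
  String.ofList number_list

-- ===== PORT B =====
-- literal port of Source B: number[:2].replace('1','I') + number[2:4].replace('I','1') + number[4:].replace('1','I')
def correct_for_i_alt (number : String) : String :=
  String.ofList
    (PySem.Chars.replace (PySem.Chars.slice number.toList none (some 2)) ['1'] ['I']
      ++ PySem.Chars.replace (PySem.Chars.slice number.toList (some 2) (some 4)) ['I'] ['1']
      ++ PySem.Chars.replace (PySem.Chars.slice number.toList (some 4) none) ['1'] ['I'])

-- ===== PRECONDITION & SPEC =====
def Spec_correct_for_i (number : String) (out : String) : Prop := out = correct_for_i_alt number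
instance (number : String) (out : String) : Decidable (Spec_correct_for_i number out) := by unfold Spec_correct_for_i; infer_instance

-- ===== CLAIM (what is proved, stated in full; the proofs are below) =====
def Claim_equal_correct_for_i : Prop := ∀ (number : String), Dom_correct_for_i number → Spec_correct_for_i number (correct_for_i number)

-- ===== LEMMAS AND PROOFS =====

-- per-position mapping of A's loop body (Nat index)
def pvG (i : Nat) (c : Char) : Char :=
  if c = 'I' ∨ c = '1' then (if i < 2 ∨ 4 ≤ i then 'I' else '1') else c

-- substitution maps of B's three replaces
def pvSub (o n : Char) (c : Char) : Char := if c = o then n else c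

-- single-char replace is a map
theorem replace_go_single (o n : Char) :
    ∀ (fuel : Nat) (l acc : List Char), l.length ≤ fuel →
      PySem.Chars.replace.go [o] [n] fuel l acc =
        acc.reverse ++ l.map (pvSub o n) := by
  intro fuel
  induction fuel with
  | zero =>
    intro l acc h
    cases l with
    | nil => simp [PySem.Chars.replace.go]
    | cons c t => simp at h
  | succ k ih =>
    intro l acc h
    cases l with
    | nil => simp [PySem.Chars.replace.go]
    | cons c t =>
      simp only [PySem.Chars.replace.go]
      by_cases hc : c = o
      · have hp : [o].isPrefixOf (c :: t) = true := by
          simp [List.isPrefixOf, hc]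
        rw [hp]
        rw [ih _ _ (by simpa using Nat.le_of_succ_le_succ h)]
        simp [pvSub, hc]
      · have hp : [o].isPrefixOf (c :: t) = false := by
          simp [List.isPrefixOf]
          exact fun hh => hc hh.symm
        rw [hp]
        simp only [Bool.false_eq_true, if_false]
        rw [ih _ _ (by simpa using Nat.le_of_succ_le_succ h)]
        simp [pvSub, hc]

theorem replace_single (o n : Char) (l : List Char) :
    PySem.Chars.replace l [o] [n] = l.map (pvSub o n) := by
  rw [PySem.Chars.replace]
  simp only [List.isEmpty_cons, Bool.false_eq_true, if_false]
  exact replace_go_single o n l.length l [] (Nat.le_refl _)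

-- mapIdx only depends on the pointwise values
theorem mapIdx_ext (f g : Nat → Char → Char) (hf : ∀ i c, f i c = g i c) :
    ∀ (t : List Char), t.mapIdx f = t.mapIdx g := by
  intro t
  induction t generalizing f g with
  | nil => simp
  | cons c t ih =>
    rw [List.mapIdx_cons, List.mapIdx_cons, hf,
      ih (fun i => f (i + 1)) (fun i => g (i + 1)) (fun i c => hf (i + 1) c)]

-- A's fold with in-place sets computes mapIdx pvG
theorem fold_set_eq (l : List Char) :
    ∀ (pre : List Char),
      (PySem.List.enumerate l (pre.length : Int)).foldl
        (fun nl p =>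
          if p.2 = 'I' ∨ p.2 = '1' then
            if p.1 < 2 ∨ 4 ≤ p.1 then PySem.List.pySetD nl p.1 'I'
            else PySem.List.pySetD nl p.1 '1'
          else nl)
        (pre ++ l)
      = pre ++ l.mapIdx (fun i c => pvG (pre.length + i) c) := by
  induction l with
  | nil => intro pre; simp [PySem.List.enumerate]
  | cons c t ih =>
    intro pre
    rw [PySem.List.enumerate_cons]
    simp only [List.foldl_cons]
    have hstep :
        (if c = 'I' ∨ c = '1' then
          if (pre.length : Int) < 2 ∨ 4 ≤ (pre.length : Int) then
            PySem.List.pySetD (pre ++ c :: t) (pre.length : Int) 'I'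
          else PySem.List.pySetD (pre ++ c :: t) (pre.length : Int) '1'
        else pre ++ c :: t)
        = pre ++ pvG pre.length c :: t := by
      unfold pvG
      by_cases h1 : c = 'I' ∨ c = '1'
      · simp only [if_pos h1]
        have hcast : ((pre.length : Int) < 2 ∨ 4 ≤ (pre.length : Int)) ↔
            (pre.length < 2 ∨ 4 ≤ pre.length) := by
          constructor <;> (intro h; rcases h with h | h; exacts [Or.inl (by exact_mod_cast h), Or.inr (by exact_mod_cast h)])
        by_cases h2 : pre.length < 2 ∨ 4 ≤ pre.length
        · rw [if_pos (hcast.mpr h2), if_pos h2]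
          simp [PySem.List.pySetD_natCast]
        · rw [if_neg (fun hh => h2 (hcast.mp hh)), if_neg h2]
          simp [PySem.List.pySetD_natCast]
      · simp [h1]
    rw [hstep]
    have h1 : ((pre.length : Int) + 1) = (((pre ++ [pvG pre.length c]).length : Nat) : Int) := by
      simp
    have h2 : pre ++ pvG pre.length c :: t = (pre ++ [pvG pre.length c]) ++ t := by simp
    rw [h1, h2, ih (pre ++ [pvG pre.length c])]
    simp only [List.mapIdx_cons, List.length_append, List.length_cons, List.length_nil,
      List.append_assoc, List.singleton_append]
    congr 1
    congr 1
    apply mapIdx_ext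
    intro i c'
    congr 1
    omega

-- mapIdx over a constant-in-index tail is a map
theorem mapIdx_const_map (g : Char → Char) (f : Nat → Char → Char)
    (hf : ∀ i c, f i c = g c) : ∀ (t : List Char), t.mapIdx f = t.map g := by
  intro t
  induction t generalizing f with
  | nil => simp
  | cons c t ih =>
    rw [List.mapIdx_cons, hf, List.map_cons, ih (fun i => f (i + 1)) (fun i c => hf (i + 1) c)]

theorem pvG_low (i : Nat) (c : Char) (h : i < 2 ∨ 4 ≤ i) : pvG i c = pvSub '1' 'I' c := by
  unfold pvG pvSub
  rw [if_pos h]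
  by_cases h1 : c = '1'
  · simp [h1]
  · by_cases h2 : c = 'I'
    · simp [h2]
    · simp [h1, h2]

theorem pvG_mid (i : Nat) (c : Char) (h1 : ¬ i < 2) (h2 : ¬ 4 ≤ i) : pvG i c = pvSub 'I' '1' c := by
  unfold pvG pvSub
  rw [if_neg (by omega : ¬ (i < 2 ∨ 4 ≤ i))]
  by_cases hI : c = 'I'
  · simp [hI]
  · by_cases h1' : c = '1'
    · simp [h1']
    · simp [hI, h1']

-- the positional mapIdx splits into B's three mapped segments
theorem mapIdx_split (l : List Char) :
    l.mapIdx (fun i c => pvG i c)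
      = (l.take 2).map (pvSub '1' 'I') ++ ((l.drop 2).take 2).map (pvSub 'I' '1')
        ++ (l.drop 4).map (pvSub '1' 'I') := by
  have tail4 : ∀ (t : List Char) (k : Nat), t.mapIdx (fun i c => pvG (i + k + 4) c) = t.map (pvSub '1' 'I') :=
    fun t k => mapIdx_const_map _ _ (fun i c => pvG_low (i + k + 4) c (Or.inr (by omega))) t
  match l with
  | [] => simp
  | [a] => simp [List.mapIdx_cons, pvG_low 0 a (by omega)]
  | [a, b] => simp [List.mapIdx_cons, pvG_low 0 a (by omega), pvG_low 1 b (by omega)]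
  | [a, b, c] =>
    simp [List.mapIdx_cons, pvG_low 0 a (by omega), pvG_low 1 b (by omega),
      pvG_mid 2 c (by omega) (by omega)]
  | [a, b, c, d] =>
    simp [List.mapIdx_cons, pvG_low 0 a (by omega), pvG_low 1 b (by omega),
      pvG_mid 2 c (by omega) (by omega), pvG_mid 3 d (by omega) (by omega)]
  | a :: b :: c :: d :: t =>
    simp only [List.mapIdx_cons, List.take, List.drop, List.map_cons]
    rw [pvG_low 0 a (by omega), pvG_low 1 b (by omega),
      pvG_mid 2 c (by omega) (by omega), pvG_mid 3 d (by omega) (by omega)]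
    have := tail4 t 0
    simp only [Nat.add_zero] at this
    simp [this]

-- ===== VERDICT (by name: the statement is the Claim_ definition above) =====
theorem correct_for_i_spec : Claim_equal_correct_for_i := by
  intro number _
  unfold Spec_correct_for_i correct_for_i correct_for_i_alt
  have hA := fold_set_eq number.toList []
  simp only [List.length_nil, Nat.cast_zero, List.nil_append, Nat.zero_add] at hA
  simp only [hA]
  congr 1
  rw [replace_single, replace_single, replace_single]
  simp only [PySem.Chars.slice_eq_listSlice]
  have hsl1 : PySem.List.slice number.toList none (some 2) = number.toList.take 2 := by simp [pysem]
  have hsl2 : PySem.List.slice number.toList (some 2) (some 4) = (number.toList.drop 2).take 2 := by simp [pysem]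
  have hsl3 : PySem.List.slice number.toList (some 4) none = number.toList.drop 4 := by simp [pysem]
  rw [hsl1, hsl2, hsl3, mapIdx_split]
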